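-- pv_equiv track=rewrite | github.com/mandheer/learn_python | lazy_loop_exercises/iteration.py | lstrip
-- ===== SOURCE A (Python) =====
-- def lstrip(iterable,item):
--     """Return iterable with strip_value items removed from beginning."""
--     first = True
--     for i in iterable:
--         if i == item and first:
--             pass
--         else:
--             first = False
--             yield i
-- ===== SOURCE B (Python) =====
-- def lstrip(iterable, item):
--     """Return iterable with item removed from beginning: count the leading run, then slice."""
--     seq = list(iterable)
--     k = 0
--     while k < len(seq) and seq[k] == item:
--         k += 1
--     yield from seq[k:]
-- ===== Notes on version B (the rewrite author's own statement) =====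
-- stated objective: alternative
-- what changed: Replaced A's flag-carrying element-by-element yield loop by a staged count-then-slice strategy: materialize the input, count the length of the leading run of matching items with an index loop, then yield the slice from that index onward in one step.
import Mathlib
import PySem

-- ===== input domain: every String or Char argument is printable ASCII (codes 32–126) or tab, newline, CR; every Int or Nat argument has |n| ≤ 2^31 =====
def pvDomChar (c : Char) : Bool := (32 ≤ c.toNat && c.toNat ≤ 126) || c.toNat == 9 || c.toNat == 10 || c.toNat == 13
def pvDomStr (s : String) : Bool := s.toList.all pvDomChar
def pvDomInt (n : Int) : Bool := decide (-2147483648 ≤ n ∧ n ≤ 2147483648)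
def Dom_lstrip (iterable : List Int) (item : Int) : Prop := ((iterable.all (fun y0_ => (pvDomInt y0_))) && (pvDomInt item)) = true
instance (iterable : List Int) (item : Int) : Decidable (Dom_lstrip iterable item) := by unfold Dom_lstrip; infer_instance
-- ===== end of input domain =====

-- B replaces A's flag-carrying yield loop by a staged count-then-slice strategy
-- (count the leading run with an index loop, then emit the slice); objective: alternative.


-- ===== PORT A =====
-- A: one loop over the list carrying the 'first' flag; yields accumulate in order.
def lstripStep (item : Int) (st : Bool × List Int) (i : Int) : Bool × List Int :=
  let (first, acc) := st
  if i == item && first then (first, acc)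
  else (false, acc ++ [i])

def lstrip (iterable : List Int) (item : Int) : List Int :=
  (iterable.foldl (lstripStep item) (true, [])).2

-- ===== PORT B =====
-- B: the 'while k < len(seq) and seq[k] == item' index loop counting the leading run
def lstrip_alt_count (seq : List Int) (item : Int) (k : Nat) : Nat :=
  if h : k < seq.length then
    if seq[k] == item then lstrip_alt_count seq item (k + 1) else k
  else k
termination_by seq.length - k

-- B: count the leading run, then yield seq[k:]
def lstrip_alt (iterable : List Int) (item : Int) : List Int :=
  PySem.List.slice iterable (some ((lstrip_alt_count iterable item 0 : Nat) : Int)) none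

-- ===== PRECONDITION & SPEC =====
def Spec_lstrip (iterable : List Int) (item : Int) (out : List Int) : Prop := out = lstrip_alt iterable item
instance (iterable : List Int) (item : Int) (out : List Int) : Decidable (Spec_lstrip iterable item out) := by unfold Spec_lstrip; infer_instance

-- ===== CLAIM =====
def Claim_equal_lstrip : Prop := ∀ (iterable : List Int) (item : Int), Dom_lstrip iterable item → Spec_lstrip iterable item (lstrip iterable item)

-- ===== LEMMAS AND PROOFS =====

-- once the flag is false, A's fold appends every remaining element
theorem lstrip_fold_false (item : Int) (xs : List Int) (acc : List Int) :
    xs.foldl (lstripStep item) (false, acc) = (false, acc ++ xs) := by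
  induction xs generalizing acc with
  | nil => simp
  | cons x xs ih =>
    rw [List.foldl_cons, show lstripStep item (false, acc) x = (false, acc ++ [x]) by
      simp [lstripStep], ih]; simp

-- unfolding equation for the while loop
theorem lstrip_count_eq (seq : List Int) (item : Int) (k : Nat) :
    lstrip_alt_count seq item k =
      if h : k < seq.length then
        (if seq[k] == item then lstrip_alt_count seq item (k + 1) else k)
      else k := by
  rw [lstrip_alt_count]

-- counting in (item :: ys) from k+1 is counting in ys from k, plus 1
theorem lstrip_count_shift (item : Int) (ys : List Int) (k : Nat) :
    lstrip_alt_count (item :: ys) item (k + 1) = lstrip_alt_count ys item k + 1 := by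
  induction hk : ys.length - k generalizing k with
  | zero =>
    rw [lstrip_count_eq (item :: ys), lstrip_count_eq ys]
    simp [show ¬ k < ys.length by omega]
  | succ n ih =>
    rw [lstrip_count_eq (item :: ys), lstrip_count_eq ys]
    have hlt : k < ys.length := by omega
    simp only [List.length_cons, dif_pos (show k + 1 < ys.length + 1 by omega), dif_pos hlt]
    simp only [List.getElem_cons_succ]
    by_cases he : ys[k] = item
    · simp only [he, beq_self_eq_true]
      exact ih (k + 1) (by omega)
    · simp [he]

-- B's counter over a cons: a match advances the count, a mismatch stops at 0
theorem lstrip_count_cons (item x : Int) (xs : List Int) :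
    lstrip_alt_count (x :: xs) item 0 =
      if x = item then lstrip_alt_count xs item 0 + 1 else 0 := by
  rw [lstrip_count_eq]
  by_cases h : x = item
  · subst h
    simp only [List.length_cons, dif_pos (show 0 < xs.length + 1 by omega),
      show (x :: xs)[0] = x from rfl, beq_self_eq_true]
    exact lstrip_count_shift x xs 0
  · simp [h]

theorem lstrip_eq_drop_count (item : Int) (xs : List Int) :
    (xs.foldl (lstripStep item) (true, [])).2 = xs.drop (lstrip_alt_count xs item 0) := by
  induction xs with
  | nil => simp [lstrip_alt_count]
  | cons x xs ih =>
    rw [lstrip_count_cons]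
    by_cases h : x = item
    · rw [List.foldl_cons, show lstripStep item (true, []) x = (true, []) by
        simp [lstripStep, h], if_pos h]
      simpa using ih
    · rw [List.foldl_cons, show lstripStep item (true, []) x = (false, [x]) by
        simp [lstripStep, h], lstrip_fold_false, if_neg h]
      simp

-- ===== VERDICT =====
theorem lstrip_spec : Claim_equal_lstrip := by
  intro iterable item _
  unfold Spec_lstrip lstrip lstrip_alt
  rw [PySem.List.slice_from_natCast]
  exact lstrip_eq_drop_count item iterable
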